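-- pv_equiv track=rewrite | github.com/anh-nguyen-98/chinese-postman-problem | odd_degree_pairing.py | pairing_vertex
-- ===== SOURCE A (Python) =====
-- def pairing_vertex(od_list, ret_list, singular_ord, len_od_list):
--
--     i = 0
--     while i < len_od_list and od_list[i] == "_":
--         i += 1
--
--     if i >= len_od_list:
--         ret_list.append([])
--         ret_list[-1] = [sublist.copy() for sublist in singular_ord]
--
--     else:
--         singular_ord.append([od_list[i]])
--         od_list[i] = "_"
--         for j in range(i + 1, len_od_list):
--             if od_list[j] != "_":
--                 singular_ord[-1].append(od_list[j])
--                 od_list[j] = "_"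
--                 pairing_vertex(od_list, ret_list, singular_ord, len_od_list)
--
--                 od_list[j] = singular_ord[-1][-1]
--                 del singular_ord[-1][-1]
--
--         od_list[i] = singular_ord[-1][0]
--         del singular_ord[-1]
--
--     return ret_list
-- ===== SOURCE B (Python) =====
-- def _matchings(rem):
--     # all perfect pairings of rem, first element paired with each later one in order
--     if not rem:
--         return [[]]
--     x, rest = rem[0], rem[1:]
--     out = []
--     for k in range(len(rest)):
--         for m in _matchings(rest[:k] + rest[k + 1:]):
--             out.append([[x, rest[k]]] + m)
--     return out
--
--
-- def pairing_vertex(od_list, ret_list, singular_ord, len_od_list):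
--     rem = [od_list[k] for k in range(len_od_list) if od_list[k] != "_"]
--     for m in _matchings(rem):
--         ret_list.append([p.copy() for p in singular_ord] + [pair.copy() for pair in m])
--     return ret_list
-- ===== Notes on version B (the rewrite author's own statement) =====
-- stated objective: simpler
-- what changed: Replaces A's in-place backtracking over the shared od_list with '_' sentinel marks and undo steps by a pure recursive enumerator: filter the unmatched vertices once, generate all pairings of that list functionally (first element paired with each later one, recursing on the remainder), and append singular_ord-prefixed copies to ret_list in one pass.
import Mathlib
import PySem

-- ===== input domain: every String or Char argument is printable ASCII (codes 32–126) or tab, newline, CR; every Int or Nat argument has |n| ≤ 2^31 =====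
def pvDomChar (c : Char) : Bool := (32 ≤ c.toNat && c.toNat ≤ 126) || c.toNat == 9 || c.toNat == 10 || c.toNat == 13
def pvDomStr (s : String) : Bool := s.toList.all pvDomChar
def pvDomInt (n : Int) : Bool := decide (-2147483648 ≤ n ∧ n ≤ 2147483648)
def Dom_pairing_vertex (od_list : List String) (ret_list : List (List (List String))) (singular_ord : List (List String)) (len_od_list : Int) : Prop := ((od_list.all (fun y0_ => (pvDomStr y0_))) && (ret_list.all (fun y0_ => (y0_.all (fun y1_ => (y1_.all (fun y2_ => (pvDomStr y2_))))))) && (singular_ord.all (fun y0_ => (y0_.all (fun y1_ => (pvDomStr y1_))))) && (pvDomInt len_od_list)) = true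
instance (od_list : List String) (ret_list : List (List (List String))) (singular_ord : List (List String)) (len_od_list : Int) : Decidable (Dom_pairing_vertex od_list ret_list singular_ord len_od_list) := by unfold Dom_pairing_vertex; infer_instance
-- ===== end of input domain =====

-- B re-implements A's in-place sentinel-marking backtracker as a pure recursive pairing
-- enumerator over the filtered unmatched vertices (objective: simpler).  A appends to
-- ret_list in place and returns it (its temporary mutations of od_list/singular_ord are
-- undone before returning); the Python B performs the same net mutation of ret_list; the
-- equivalence proved here is about the RETURN value.

-- ===== PORT A =====
-- A's while-loop 'i = 0; while i < len_od_list and od_list[i] == "_": i += 1'.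
-- od_list[i] is modelled by getD i "" (exact for i < od_list.length; for larger i Python
-- raises IndexError, which happens only outside Pre_pairing_vertex where len_od_list > length).
def pvScanA (od_list : List String) (len_od_list : Int) (i : Nat) : Nat :=
  if (i : Int) < len_od_list ∧ od_list.getD i "" = "_" then pvScanA od_list len_od_list (i + 1) else i
termination_by (len_od_list - i).toNat
decreasing_by omega

-- number of not-yet-matched (≠ "_") entries: the termination measure of A's recursion
def pvC (od_list : List String) : Nat := od_list.countP (fun s => s != "_")

theorem pvC_set_mark (l : List String) (j : Nat) (hj : j < l.length) (hv : l.getD j "" ≠ "_") :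
    pvC (l.set j "_") + 1 = pvC l := by
  have hg : l.getD j "" = l[j] := List.getD_eq_getElem l "" hj
  have hp : (l[j] != "_") = true := by rw [← hg]; simpa using hv
  have hpos : 0 < l.countP (fun s => s != "_") :=
    List.countP_pos_iff.mpr ⟨l[j], l.getElem_mem hj, hp⟩
  simp only [pvC, List.countP_set hj, hp]
  simp
  omega

-- exit condition of the while-scan (used by the port's termination argument)
theorem pvScanA_stop (od : List String) (n : Int) (i0 : Nat) :
    ¬(((pvScanA od n i0 : Nat) : Int) < n ∧ od.getD (pvScanA od n i0) "" = "_") := by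
  fun_induction pvScanA od n i0 with
  | case1 i hi ih => exact ih
  | case2 i hi => exact hi

mutual
-- literal port of A: the recursion carries the (persistent) current od_list and
-- singular_ord; Python's 'restore' statements after each recursive call correspond to
-- simply reusing the unmodified value.
def pairing_vertex (od_list : List String) (ret_list : List (List (List String))) (singular_ord : List (List String)) (len_od_list : Int) : List (List (List String)) :=
  let i := pvScanA od_list len_od_list 0
  if (i : Int) ≥ len_od_list then
    -- ret_list.append([]); ret_list[-1] = [sublist.copy() for sublist in singular_ord]
    ret_list ++ [singular_ord.map (fun sublist => sublist)]
  else
    if h : i < od_list.length then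
      -- singular_ord.append([od_list[i]]); od_list[i] = "_"; for j in range(i+1, len_od_list): …
      -- (the loop body threads ret_list; od_list/singular_ord are restored by Python before return)
      pvLoopA (od_list.set i "_") ret_list singular_ord (od_list.getD i "") len_od_list (i + 1)
    else
      ret_list  -- unreachable under Pre_: Python's od_list[i] raises IndexError here
termination_by (pvC od_list, 1, 0)
decreasing_by
  have hstop := pvScanA_stop od_list len_od_list 0
  have hlt : pvC (od_list.set (pvScanA od_list len_od_list 0) "_") + 1 = pvC od_list := by
    apply pvC_set_mark _ _ h
    intro hmark
    exact hstop ⟨by omega, hmark⟩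
  simp [Prod.lex_def]
  omega

-- the 'for j in range(i+1, len_od_list)' loop of A, j counting upward
def pvLoopA (od1 : List String) (ret_list : List (List (List String))) (singular_ord : List (List String)) (v : String) (len_od_list : Int) (j : Nat) : List (List (List String)) :=
  if hj : (j : Int) < len_od_list then
    if h : j < od1.length ∧ od1.getD j "" ≠ "_" then
      -- singular_ord[-1].append(od_list[j]); od_list[j] = "_"; recurse; restore
      pvLoopA od1
        (pairing_vertex (od1.set j "_") ret_list (singular_ord ++ [[v, od1.getD j ""]]) len_od_list)
        singular_ord v len_od_list (j + 1)
    else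
      -- od1[j] == "_" (or j out of range: Python raises IndexError, outside Pre_)
      pvLoopA od1 ret_list singular_ord v len_od_list (j + 1)
  else
    ret_list
termination_by (pvC od1 + 1, 0, (len_od_list - j).toNat)
decreasing_by
  · have := pvC_set_mark od1 j h.1 h.2
    simp [Prod.lex_def]
    omega
  · simp [Prod.lex_def]
    omega
  · simp [Prod.lex_def]
    omega
end

-- ===== PORT B =====
-- all perfect pairings of rem: first element paired with each later one in order,
-- recursing on the list with both removed (Source B's _matchings)
def pvMatchings : List String → List (List (List String))
  | [] => [[]]
  | x :: rest =>
    (List.range rest.length).attach.foldl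
      (fun out k =>
        out ++ (pvMatchings (rest.take k.1 ++ rest.drop (k.1 + 1))).map
          (fun m => [x, rest.getD k.1 ""] :: m))
      []
termination_by l => l.length
decreasing_by
  have := List.mem_range.mp k.2
  simp only [List.length_append, List.length_take, List.length_drop, List.length_cons]
  omega

def pairing_vertex_alt (od_list : List String) (ret_list : List (List (List String))) (singular_ord : List (List String)) (len_od_list : Int) : List (List (List String)) :=
  -- rem = [od_list[k] for k in range(len_od_list) if od_list[k] != "_"]
  -- (od_list[k] modelled by getD, exact for k < od_list.length, i.e. inside Pre_)
  let rem := ((PySem.List.pyRange 0 len_od_list 1).map (fun k => od_list.getD k.toNat "")).filter (fun x => x != "_")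
  -- for m in _matchings(rem): ret_list.append([p.copy() for p in singular_ord] + [pair.copy() for pair in m])
  ret_list ++ (pvMatchings rem).map
    (fun m => singular_ord.map (fun p => p) ++ m.map (fun pair => pair))

-- ===== PRECONDITION & SPEC =====
-- Pre_ excludes exactly the inputs on which A raises IndexError: len_od_list > len(od_list)
-- (both the while-scan and the for-loop index od_list up to len_od_list - 1).
def Pre_pairing_vertex (od_list : List String) (ret_list : List (List (List String))) (singular_ord : List (List String)) (len_od_list : Int) : Prop :=
  len_od_list ≤ (od_list.length : Int)
instance (od_list : List String) (ret_list : List (List (List String))) (singular_ord : List (List String)) (len_od_list : Int) : Decidable (Pre_pairing_vertex od_list ret_list singular_ord len_od_list) := by unfold Pre_pairing_vertex; infer_instance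

def pvWitness_pairing_vertex : List String × List (List (List String)) × List (List String) × Int :=
  (["a", "b", "c", "d"], [[["z", "w"]]], [["p", "q"]], 4)

def Spec_pairing_vertex (od_list : List String) (ret_list : List (List (List String))) (singular_ord : List (List String)) (len_od_list : Int) (out : List (List (List String))) : Prop := out = pairing_vertex_alt od_list ret_list singular_ord len_od_list
instance (od_list : List String) (ret_list : List (List (List String))) (singular_ord : List (List String)) (len_od_list : Int) (out : List (List (List String))) : Decidable (Spec_pairing_vertex od_list ret_list singular_ord len_od_list out) := by unfold Spec_pairing_vertex; infer_instance

-- ===== CLAIM (what is proved, stated in full; the proofs are below) =====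
def Claim_equal_pairing_vertex : Prop := ∀ (od_list : List String) (ret_list : List (List (List String))) (singular_ord : List (List String)) (len_od_list : Int), Dom_pairing_vertex od_list ret_list singular_ord len_od_list → Pre_pairing_vertex od_list ret_list singular_ord len_od_list → Spec_pairing_vertex od_list ret_list singular_ord len_od_list (pairing_vertex od_list ret_list singular_ord len_od_list)

-- ===== LEMMAS AND PROOFS =====

-- the still-unmatched entries among the first n positions, in order
def pvRem (od : List String) (n : Int) : List String :=
  (od.take n.toNat).filter (fun s => s != "_")

-- the unmatched entries among positions [j, n)
def pvSeg (od : List String) (j : Nat) (n : Int) : List String :=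
  ((od.take n.toNat).drop j).filter (fun s => s != "_")

-- the unmatched entries among positions [0, j)
def pvPre' (od : List String) (j : Nat) : List String :=
  (od.take j).filter (fun s => s != "_")

-- structural counterpart of A's partner loop: pair x with each element of tl in turn,
-- the remaining pool being pre ++ (tl minus the partner)
def pvExpand (x : String) (pre : List String) : List String → List (List (List String))
  | [] => []
  | y :: tl =>
    (pvMatchings (pre ++ tl)).map (fun m => [x, y] :: m) ++ pvExpand x (pre ++ [y]) tl

theorem pvScanA_prefix (od : List String) (n : Int) (i0 : Nat) :
    ∀ k, i0 ≤ k → k < pvScanA od n i0 → od.getD k "" = "_" := by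
  fun_induction pvScanA od n i0 with
  | case1 i hi ih =>
    intro k hk1 hk2
    rcases Nat.eq_or_lt_of_le hk1 with h | h
    · exact h ▸ hi.2
    · exact ih k h hk2
  | case2 i hi => intro k hk1 hk2; omega

theorem pvExpand_eq_flatMap : ∀ (tl pre : List String) (x : String),
    pvExpand x pre tl = (List.range tl.length).flatMap
      (fun k => (pvMatchings (pre ++ (tl.take k ++ tl.drop (k + 1)))).map
        (fun m => [x, tl.getD k ""] :: m))
  | [], pre, x => by simp [pvExpand]
  | y :: tl, pre, x => by
    rw [pvExpand, pvExpand_eq_flatMap tl (pre ++ [y]) x,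
      List.length_cons, List.range_succ_eq_map, List.flatMap_cons, List.flatMap_map]
    congr 1
    apply List.flatMap_congr
    intro k _
    simp [List.append_assoc]

theorem pvMatchings_eq_expand (x : String) (rest : List String) :
    pvMatchings (x :: rest) = pvExpand x [] rest := by
  rw [pvMatchings,
    List.foldl_attach (l := List.range rest.length)
      (f := fun out k => out ++ (pvMatchings (rest.take k ++ rest.drop (k + 1))).map
        (fun m => [x, rest.getD k ""] :: m)) (b := []),
    PySem.List.foldl_append_eq_flatMap, List.nil_append, pvExpand_eq_flatMap]
  simp

theorem pvSeg_nil (od : List String) (j : Nat) (n : Int) (h : n.toNat ≤ j) :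
    pvSeg od j n = [] := by
  have : (od.take n.toNat).drop j = [] :=
    List.drop_eq_nil_of_le (le_trans (List.length_take_le _ _) h)
  simp [pvSeg, this]

theorem pvSeg_cons (od : List String) (j : Nat) (n : Int) (hj : j < n.toNat)
    (hl : j < od.length) :
    pvSeg od j n = if od.getD j "" != "_" then od.getD j "" :: pvSeg od (j + 1) n
      else pvSeg od (j + 1) n := by
  have hlen : j < (od.take n.toNat).length := by simp; omega
  have hget : (od.take n.toNat)[j]'hlen = od[j]'hl := List.getElem_take
  rw [pvSeg, List.drop_eq_getElem_cons hlen, List.filter_cons, hget,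
    List.getD_eq_getElem od "" hl]
  rfl

theorem pvPre'_succ (od : List String) (j : Nat) (hl : j < od.length) :
    pvPre' od (j + 1) = pvPre' od j ++ (if od.getD j "" != "_" then [od.getD j ""] else []) := by
  rw [pvPre', List.take_succ, List.filter_append, List.getD_eq_getElem od "" hl]
  have : od[j]?.toList = [od[j]'hl] := by simp [List.getElem?_eq_getElem hl]
  rw [this]
  rcases h : (od[j]'hl != "_") with _ | _ <;> simp [pvPre', List.filter_cons, h]

theorem pvRem_set (od : List String) (j : Nat) (n : Int) (hl : j < od.length)
    (hj : j < n.toNat) :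
    pvRem (od.set j "_") n = pvPre' od j ++ pvSeg od (j + 1) n := by
  have hlen : j < (od.take n.toNat).length := by simp; omega
  rw [pvRem, List.take_set, List.set_eq_take_append_cons_drop, if_pos hlen,
    List.filter_append, List.filter_cons]
  simp only [List.take_take, min_eq_left (le_of_lt hj)]
  simp [pvPre', pvSeg]

theorem pvSeg_set_lt (od : List String) (i j : Nat) (n : Int) (h : i < j) :
    pvSeg (od.set i "_") j n = pvSeg od j n := by
  rw [pvSeg, List.take_set, List.drop_set]
  simp [Nat.lt_of_lt_of_le h (le_refl j), h, pvSeg]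

theorem pvPre'_set_all (od : List String) (i : Nat) (hl : i < od.length)
    (hpre : ∀ k, k < i → od.getD k "" = "_") :
    pvPre' (od.set i "_") (i + 1) = [] := by
  rw [pvPre', List.filter_eq_nil_iff]
  intro x hx
  rw [List.mem_iff_getElem] at hx
  obtain ⟨k, hk, hxk⟩ := hx
  have hk' : k < i + 1 := by
    have := List.length_take_le (i + 1) (od.set i "_")
    omega
  have hkod : k < od.length := by
    simp at hk; omega
  have hx' : x = (od.set i "_")[k]'(by simp; omega) := by
    rw [← hxk]; exact List.getElem_take
  rw [List.getElem_set] at hx'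
  by_cases hki : i = k
  · simp [hki] at hx'
    simp [hx']
  · rw [if_neg hki] at hx'
    have := hpre k (by omega)
    rw [List.getD_eq_getElem od "" hkod] at this
    simp [hx', this]

theorem pvRem_nil (od : List String) (n : Int)
    (hpre : ∀ k, k < n.toNat → od.getD k "" = "_") :
    pvRem od n = [] := by
  rw [pvRem, List.filter_eq_nil_iff]
  intro x hx
  rw [List.mem_iff_getElem] at hx
  obtain ⟨k, hk, hxk⟩ := hx
  have hkn : k < n.toNat := by have := List.length_take_le n.toNat od; omega
  have hkod : k < od.length := by simp at hk; omega
  have hx' : x = od[k]'hkod := by rw [← hxk]; exact List.getElem_take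
  have := hpre k hkn
  rw [List.getD_eq_getElem od "" hkod] at this
  simp [hx', this]

theorem pvFilterConsOfPrefix (l : List String) :
    ∀ (i : Nat) (hi : i < l.length), (∀ k (hk : k < i), l[k]'(by omega) = "_") →
      l[i] ≠ "_" →
      l.filter (fun s => s != "_") = l[i] :: (l.drop (i + 1)).filter (fun s => s != "_") := by
  induction l with
  | nil => intro i hi; simp at hi
  | cons a l ih =>
    intro i hi hpre hv
    cases i with
    | zero => simp_all [List.filter_cons]
    | succ i =>
      have ha : a = "_" := hpre 0 (by omega)
      rw [List.filter_cons]
      simp only [ha, List.getElem_cons_succ, List.drop_succ_cons]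
      simp only [bne_self_eq_false, if_neg]
      exact ih i (by simpa using hi) (fun k hk => hpre (k + 1) (by omega)) (by simpa using hv)

theorem pvRem_cons (od : List String) (i : Nat) (n : Int) (hi : i < n.toNat)
    (hl : i < od.length) (hpre : ∀ k, k < i → od.getD k "" = "_")
    (hv : od.getD i "" ≠ "_") :
    pvRem od n = od.getD i "" :: pvSeg od (i + 1) n := by
  have hlen : i < (od.take n.toNat).length := by simp; omega
  have hgv : (od.take n.toNat)[i]'hlen = od[i]'hl := List.getElem_take
  rw [List.getD_eq_getElem od "" hl] at hv ⊢
  rw [pvRem, pvFilterConsOfPrefix (od.take n.toNat) i hlen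
      (fun k hk => by
        have hkod : k < od.length := by omega
        have h2 : (od.take n.toNat)[k]'(by omega) = od[k]'hkod := List.getElem_take
        rw [h2]
        have := hpre k hk
        rwa [List.getD_eq_getElem od "" hkod] at this)
      (by rw [hgv]; exact hv), hgv, pvSeg]

theorem pvLoopA_eq (od1 : List String) (n : Int) (hn : n ≤ (od1.length : Int)) (v : String)
    (sing : List (List String))
    (IH : ∀ od', pvC od' < pvC od1 → ∀ (n' : Int), n' ≤ (od'.length : Int) →
      ∀ ret' sing', pairing_vertex od' ret' sing' n' =
        ret' ++ (pvMatchings (pvRem od' n')).map (fun m => sing' ++ m)) :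
    ∀ (k j : Nat) (ret : List (List (List String))), (n - j).toNat ≤ k →
      pvLoopA od1 ret sing v n j =
        ret ++ (pvExpand v (pvPre' od1 j) (pvSeg od1 j n)).map (fun e => sing ++ e) := by
  intro k
  induction k with
  | zero =>
    intro j ret hk
    have hj : ¬((j : Int) < n) := by omega
    rw [pvLoopA, dif_neg hj, pvSeg_nil od1 j n (by omega)]
    simp [pvExpand]
  | succ k ih =>
    intro j ret hk
    by_cases hj : (j : Int) < n
    · have hjl : j < od1.length := by omega
      rw [pvLoopA, dif_pos hj]
      by_cases hv : od1.getD j "" = "_"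
      · rw [dif_neg (fun hcon => hcon.2 hv)]
        rw [ih (j + 1) ret (by omega)]
        rw [pvSeg_cons od1 j n (by omega) hjl, pvPre'_succ od1 j hjl]
        simp only [List.getD] at hv
        simp [hv]
      · rw [dif_pos ⟨hjl, hv⟩]
        have hC : pvC (od1.set j "_") < pvC od1 := by
          have := pvC_set_mark od1 j hjl hv; omega
        rw [IH _ hC n (by simpa using hn) ret (sing ++ [[v, od1.getD j ""]])]
        rw [pvRem_set od1 j n hjl (by omega)]
        rw [ih (j + 1) _ (by omega)]
        rw [pvSeg_cons od1 j n (by omega) hjl, pvPre'_succ od1 j hjl]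
        simp only [hv, bne_iff_ne, ne_eq, not_false_iff, if_pos, if_true]
        rw [pvExpand]
        simp [List.map_map, Function.comp, List.append_assoc]
    · rw [pvLoopA, dif_neg hj, pvSeg_nil od1 j n (by omega)]
      simp [pvExpand]

theorem pvMainA (c : Nat) : ∀ od, pvC od < c → ∀ (n : Int), n ≤ (od.length : Int) →
    ∀ ret sing, pairing_vertex od ret sing n =
      ret ++ (pvMatchings (pvRem od n)).map (fun m => sing ++ m) := by
  induction c with
  | zero => intro od h; omega
  | succ c ih =>
    intro od hc n hn ret sing
    rw [pairing_vertex]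
    by_cases hge : ((pvScanA od n 0 : Nat) : Int) ≥ n
    · rw [if_pos hge]
      rw [pvRem_nil od n (fun k hk => pvScanA_prefix od n 0 k (Nat.zero_le k) (by omega))]
      simp [pvMatchings]
    · have hi_lt_n : ((pvScanA od n 0 : Nat) : Int) < n := by omega
      have hil : pvScanA od n 0 < od.length := by omega
      have hv : od.getD (pvScanA od n 0) "" ≠ "_" := fun hm => pvScanA_stop od n 0 ⟨hi_lt_n, hm⟩
      rw [if_neg hge, dif_pos hil]
      have hCset : pvC (od.set (pvScanA od n 0) "_") + 1 = pvC od := pvC_set_mark od _ hil hv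
      rw [pvLoopA_eq (od.set (pvScanA od n 0) "_") n (by simpa using hn) (od.getD (pvScanA od n 0) "")
        sing (fun od' h' => ih od' (by omega)) ((n - (pvScanA od n 0 + 1)).toNat)
        (pvScanA od n 0 + 1) ret le_rfl]
      rw [pvPre'_set_all od (pvScanA od n 0) hil
        (fun k hk => pvScanA_prefix od n 0 k (Nat.zero_le k) hk)]
      rw [pvSeg_set_lt od (pvScanA od n 0) (pvScanA od n 0 + 1) n (Nat.lt_succ_self _)]
      rw [pvRem_cons od (pvScanA od n 0) n (by omega) hil
        (fun k hk => pvScanA_prefix od n 0 k (Nat.zero_le k) hk) hv]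
      rw [pvMatchings_eq_expand]

theorem pvRangeMapGetD (od : List String) (m : Nat) (hm : m ≤ od.length) :
    (List.range m).map (fun k => od.getD k "") = od.take m := by
  induction m with
  | zero => simp
  | succ m ih =>
    rw [List.range_succ, List.map_append, ih (by omega), List.take_succ]
    have h : m < od.length := by omega
    simp [List.getElem?_eq_getElem h, List.getD_eq_getElem od "" h]

theorem pvAltRem (od : List String) (n : Int) (hn : n ≤ (od.length : Int)) :
    ((PySem.List.pyRange 0 n 1).map (fun k => od.getD k.toNat "")).filter (fun x => x != "_") =
      pvRem od n := by
  rw [PySem.List.pyRange_one, List.map_map]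
  have : ((fun k => od.getD k.toNat "") ∘ fun (k : Nat) => (0 : Int) + k) =
      fun (k : Nat) => od.getD k "" := by
    funext k; simp
  rw [this]
  have hsub : ((n : Int) - 0).toNat = n.toNat := by omega
  rw [hsub, pvRangeMapGetD od n.toNat (by omega), pvRem]

-- ===== VERDICT (by name: the statement is the Claim_ definition above) =====
theorem pairing_vertex_spec : Claim_equal_pairing_vertex := by
  intro od ret sing n _ hpre
  unfold Spec_pairing_vertex pairing_vertex_alt
  rw [pvAltRem od n hpre]
  have hmap : (fun (m : List (List String)) => sing.map (fun p => p) ++ m.map (fun pair => pair)) =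
      fun m => sing ++ m := by
    funext m; simp
  rw [hmap]
  exact pvMainA (pvC od + 1) od (Nat.lt_succ_self _) n hpre ret sing
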